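-- pv_equiv track=rewrite | github.com/monchemin/lettertran | tn/crf_maker.py | getsyllabepos
-- ===== SOURCE A (Python) =====
-- def getsyllabepos(word, syllabe):
--
--     #i = 0
--     sypos = []
--     for sy in syllabe.split("-"):
--
--         if len(sy) == 1:
--             sypos.append('b')
--         else:
--             j = 0
--             while j < len(sy):
--                 if j == 0:
--                     #syldict[word[i]]='b'
--                     sypos.append('b')
--                 elif j == len(sy)-1:
--                     #syldict[word[i]]='e'
--                     sypos.append('e')
--                 else:
--                     #syldict[word[i]]=' '
--                     sypos.append('-')
--                 j += 1
--            # i += 1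
--     if len(sypos) == len(word):
--
--
--         return sypos
--     else:
--
--         return []
-- ===== SOURCE B (Python) =====
-- def _block(L):
--     if L == 0:
--         return []
--     if L == 1:
--         return ['b']
--     return ['b'] + ['-'] * (L - 2) + ['e']
--
-- def getsyllabepos(word, syllabe):
--     sypos = [lab for sy in syllabe.split("-") for lab in _block(len(sy))]
--     return sypos if len(sypos) == len(word) else []
-- ===== Notes on version B (the rewrite author's own statement) =====
-- stated objective: simpler
-- what changed: Replaces the per-character while loop with index tests by direct construction of each syllable's whole label block ('b' + '-'*(L-2) + 'e') flattened in one comprehension.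
import Mathlib
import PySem

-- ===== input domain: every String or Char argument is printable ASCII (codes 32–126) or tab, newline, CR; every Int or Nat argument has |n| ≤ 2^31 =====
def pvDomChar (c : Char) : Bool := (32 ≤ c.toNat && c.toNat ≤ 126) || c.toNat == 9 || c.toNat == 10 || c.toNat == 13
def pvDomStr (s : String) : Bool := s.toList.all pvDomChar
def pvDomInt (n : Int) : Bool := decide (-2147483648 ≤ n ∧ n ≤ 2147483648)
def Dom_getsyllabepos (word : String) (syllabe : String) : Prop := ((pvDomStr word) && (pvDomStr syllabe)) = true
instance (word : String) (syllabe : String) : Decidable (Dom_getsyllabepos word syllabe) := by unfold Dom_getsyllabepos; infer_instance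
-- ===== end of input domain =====

-- B replaces A's per-character while loop by direct construction of each syllable's whole label block; objective: simpler.


-- ===== PORT A =====
-- literal port: 'for sy in syllabe.split("-")' with the inner 'while j < len(sy)' as a fold over range(len(sy))
def getsyllabepos (word : String) (syllabe : String) : List String :=
  let sypos : List String :=
    (PySem.Chars.splitOn syllabe.toList ['-']).foldl (fun sypos sy =>
      if sy.length = 1 then sypos ++ ["b"]
      else
        (List.range sy.length).foldl (fun sypos j =>
          if j = 0 then sypos ++ ["b"]
          else if j = sy.length - 1 then sypos ++ ["e"]
          else sypos ++ ["-"]) sypos) []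
  if sypos.length = word.toList.length then sypos else []

-- ===== PORT B =====
def sylBlock (L : Nat) : List String :=
  if L = 0 then []
  else if L = 1 then ["b"]
  else "b" :: (List.replicate (L - 2) "-" ++ ["e"])

def getsyllabepos_alt (word : String) (syllabe : String) : List String :=
  let sypos : List String :=
    (PySem.Chars.splitOn syllabe.toList ['-']).flatMap (fun sy => sylBlock sy.length)
  if sypos.length = word.toList.length then sypos else []

-- ===== PRECONDITION & SPEC =====
def Spec_getsyllabepos (word : String) (syllabe : String) (out : List String) : Prop := out = getsyllabepos_alt word syllabe
instance (word : String) (syllabe : String) (out : List String) : Decidable (Spec_getsyllabepos word syllabe out) := by unfold Spec_getsyllabepos; infer_instance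

-- ===== CLAIM (what is proved, stated in full; the proofs are below) =====
def Claim_equal_getsyllabepos : Prop := ∀ (word : String) (syllabe : String), Dom_getsyllabepos word syllabe → Spec_getsyllabepos word syllabe (getsyllabepos word syllabe)

-- ===== LEMMAS AND PROOFS =====

-- the per-character labels of one syllable, read off range(len), form exactly its block
theorem mapLab_eq_block (n : Nat) :
    (List.range n).map (fun j => if j = 0 then "b" else if j = n - 1 then "e" else "-") = sylBlock n := by
  match n with
  | 0 => simp [sylBlock]
  | 1 => simp [sylBlock, List.range_succ]
  | m + 2 =>
    rw [List.range_succ, List.map_append, List.range_succ_eq_map]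
    simp only [List.map_cons, List.map_map]
    have h1 : (List.range m).map ((fun j => if j = 0 then "b" else if j = m + 2 - 1 then "e" else "-") ∘ (· + 1))
        = List.replicate m "-" := by
      rw [List.eq_replicate_iff]
      constructor
      · simp
      · intro b hb
        simp only [List.mem_map, List.mem_range, Function.comp] at hb
        obtain ⟨j, hj, rfl⟩ := hb
        simp only [Nat.succ_ne_zero, if_false, ite_eq_right_iff]
        omega
    rw [h1]
    simp [sylBlock]

-- one step of A's outer loop appends exactly the block of the syllable
theorem stepA_eq (sy : List Char) (acc : List String) :
    (if sy.length = 1 then acc ++ ["b"]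
     else
       (List.range sy.length).foldl (fun sypos j =>
         if j = 0 then sypos ++ ["b"]
         else if j = sy.length - 1 then sypos ++ ["e"]
         else sypos ++ ["-"]) acc) = acc ++ sylBlock sy.length := by
  by_cases h1 : sy.length = 1
  · simp [h1, sylBlock]
  · rw [if_neg h1]
    have hf : (fun (sypos : List String) (j : Nat) =>
        if j = 0 then sypos ++ ["b"]
        else if j = sy.length - 1 then sypos ++ ["e"]
        else sypos ++ ["-"]) =
        (fun sypos j => sypos ++ [if j = 0 then "b" else if j = sy.length - 1 then "e" else "-"]) := by
      funext sypos j; split_ifs <;> rfl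
    rw [hf, PySem.List.foldl_append_singleton_eq_map, mapLab_eq_block]

-- A's whole outer loop builds the flattened blocks
theorem foldA_eq_flatMap (l : List (List Char)) :
    l.foldl (fun sypos sy =>
      if sy.length = 1 then sypos ++ ["b"]
      else
        (List.range sy.length).foldl (fun sypos j =>
          if j = 0 then sypos ++ ["b"]
          else if j = sy.length - 1 then sypos ++ ["e"]
          else sypos ++ ["-"]) sypos) [] =
    l.flatMap (fun sy => sylBlock sy.length) := by
  have hf : (fun (sypos : List String) (sy : List Char) =>
      if sy.length = 1 then sypos ++ ["b"]
      else
        (List.range sy.length).foldl (fun sypos j =>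
          if j = 0 then sypos ++ ["b"]
          else if j = sy.length - 1 then sypos ++ ["e"]
          else sypos ++ ["-"]) sypos) =
      (fun sypos sy => sypos ++ sylBlock sy.length) := by
    funext acc sy; exact stepA_eq sy acc
  rw [hf, PySem.List.foldl_append_eq_flatMap, List.nil_append]

theorem getsyllabepos_eq (word syllabe : String) :
    getsyllabepos word syllabe = getsyllabepos_alt word syllabe := by
  simp only [getsyllabepos, getsyllabepos_alt, foldA_eq_flatMap]

-- ===== VERDICT (by name: the statement is the Claim_ definition above) =====
theorem getsyllabepos_spec : Claim_equal_getsyllabepos := by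
  intro word syllabe _
  exact getsyllabepos_eq word syllabe
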